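-- pv_equiv track=rewrite | github.com/sarbeshtiwari/arc-agi-3 | environment_files/ms01/ms01.py | _get_source_region_cells
-- ===== SOURCE A (Python) =====
-- from typing import Any, Dict, List, Optional, Tuple
--
-- def _get_source_region_cells(w: int, h: int, axis_type: str) -> List[Tuple[int, int]]:
--     cells = []
--     if axis_type == "vertical":
--         for y in range(h):
--             for x in range(w // 2):
--                 cells.append((x, y))
--     elif axis_type == "horizontal":
--         for y in range(h // 2):
--             for x in range(w):
--                 cells.append((x, y))
--     elif axis_type == "dual":
--         for y in range(h // 2):
--             for x in range(w // 2):
--                 cells.append((x, y))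
--     elif axis_type == "diagonal_main":
--         for y in range(h):
--             for x in range(y + 1, w):
--                 cells.append((x, y))
--     elif axis_type == "diagonal_anti":
--         n = w
--         for y in range(h):
--             for x in range(w):
--                 if x + y < n - 1:
--                     cells.append((x, y))
--     return cells
-- ===== SOURCE B (Python) =====
-- def _get_source_region_cells(w, h, axis_type):
--     predicates = {
--         "vertical": lambda x, y: x < w // 2,
--         "horizontal": lambda x, y: y < h // 2,
--         "dual": lambda x, y: x < w // 2 and y < h // 2,
--         "diagonal_main": lambda x, y: x > y,
--         "diagonal_anti": lambda x, y: x + y < w - 1,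
--     }
--     pred = predicates.get(axis_type)
--     if pred is None:
--         return []
--     return [(x, y) for y in range(h) for x in range(w) if pred(x, y)]
-- ===== Notes on version B (the rewrite author's own statement) =====
-- stated objective: simpler
-- what changed: Replaces the 5-branch dispatch with specialized loop bounds by one uniform scan of the whole w x h grid filtered by a per-axis predicate looked up in a dict.
import Mathlib
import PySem

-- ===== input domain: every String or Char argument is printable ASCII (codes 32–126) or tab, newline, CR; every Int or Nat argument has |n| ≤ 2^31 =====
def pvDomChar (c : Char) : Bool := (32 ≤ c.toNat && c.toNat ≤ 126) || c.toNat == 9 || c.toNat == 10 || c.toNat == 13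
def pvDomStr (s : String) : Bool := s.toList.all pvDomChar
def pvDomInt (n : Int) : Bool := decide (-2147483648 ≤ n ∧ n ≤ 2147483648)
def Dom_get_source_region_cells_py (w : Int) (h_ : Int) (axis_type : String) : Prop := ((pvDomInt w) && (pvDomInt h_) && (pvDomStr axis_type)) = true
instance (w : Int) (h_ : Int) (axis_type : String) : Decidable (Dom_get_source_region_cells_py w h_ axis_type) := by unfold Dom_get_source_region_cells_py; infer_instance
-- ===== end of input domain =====

-- B replaces A's five specialized loop shapes by one uniform scan of the whole w×h grid
-- filtered by a per-axis predicate looked up in a dict (objective: simpler).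

-- ===== PORT A =====
-- literal transliteration of A: five branches, each with its own loop bounds
def get_source_region_cells_py (w : Int) (h_ : Int) (axis_type : String) : List (Int × Int) :=
  if axis_type = "vertical" then
    (PySem.List.pyRange 0 h_ 1).foldl (fun cells y =>
      (PySem.List.pyRange 0 (PySem.Int.floordiv w 2) 1).foldl (fun cells x => cells ++ [(x, y)]) cells) []
  else if axis_type = "horizontal" then
    (PySem.List.pyRange 0 (PySem.Int.floordiv h_ 2) 1).foldl (fun cells y =>
      (PySem.List.pyRange 0 w 1).foldl (fun cells x => cells ++ [(x, y)]) cells) []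
  else if axis_type = "dual" then
    (PySem.List.pyRange 0 (PySem.Int.floordiv h_ 2) 1).foldl (fun cells y =>
      (PySem.List.pyRange 0 (PySem.Int.floordiv w 2) 1).foldl (fun cells x => cells ++ [(x, y)]) cells) []
  else if axis_type = "diagonal_main" then
    (PySem.List.pyRange 0 h_ 1).foldl (fun cells y =>
      (PySem.List.pyRange (y + 1) w 1).foldl (fun cells x => cells ++ [(x, y)]) cells) []
  else if axis_type = "diagonal_anti" then
    let n := w
    (PySem.List.pyRange 0 h_ 1).foldl (fun cells y =>
      (PySem.List.pyRange 0 w 1).foldl (fun cells x =>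
        if x + y < n - 1 then cells ++ [(x, y)] else cells) cells) []
  else []

-- ===== PORT B =====
-- predicates.get(axis_type): per-axis-type predicate, none for unknown axis_type
def pvPredB (w : Int) (h_ : Int) (axis_type : String) : Option (Int → Int → Bool) :=
  if axis_type = "vertical" then some (fun x _ => decide (x < PySem.Int.floordiv w 2))
  else if axis_type = "horizontal" then some (fun _ y => decide (y < PySem.Int.floordiv h_ 2))
  else if axis_type = "dual" then some (fun x y => decide (x < PySem.Int.floordiv w 2) && decide (y < PySem.Int.floordiv h_ 2))
  else if axis_type = "diagonal_main" then some (fun x y => decide (y < x))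
  else if axis_type = "diagonal_anti" then some (fun x y => decide (x + y < w - 1))
  else none

-- uniform comprehension over the whole grid, filtered by the predicate
def get_source_region_cells_py_alt (w : Int) (h_ : Int) (axis_type : String) : List (Int × Int) :=
  match pvPredB w h_ axis_type with
  | none => []
  | some pred =>
    (PySem.List.pyRange 0 h_ 1).flatMap (fun y =>
      ((PySem.List.pyRange 0 w 1).filter (fun x => pred x y)).map (fun x => (x, y)))

-- ===== PRECONDITION & SPEC =====
def Spec_get_source_region_cells_py (w : Int) (h_ : Int) (axis_type : String) (out : List (Int × Int)) : Prop := out = get_source_region_cells_py_alt w h_ axis_type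
instance (w : Int) (h_ : Int) (axis_type : String) (out : List (Int × Int)) : Decidable (Spec_get_source_region_cells_py w h_ axis_type out) := by unfold Spec_get_source_region_cells_py; infer_instance

-- ===== CLAIM (what is proved, stated in full; the proofs are below) =====
def Claim_equal_get_source_region_cells_py : Prop := ∀ (w : Int) (h_ : Int) (axis_type : String), Dom_get_source_region_cells_py w h_ axis_type → Spec_get_source_region_cells_py w h_ axis_type (get_source_region_cells_py w h_ axis_type)

-- ===== LEMMAS AND PROOFS =====

-- filtering range(0, w) by x < m keeps exactly range(0, m), whenever m ≤ w or m ≤ 0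
lemma pv_filter_lt (w m : Int) (hm : m ≤ w ∨ m ≤ 0) :
    (PySem.List.pyRange 0 w 1).filter (fun x => decide (x < m)) = PySem.List.pyRange 0 m 1 := by
  rcases (by omega : m ≤ 0 ∨ 0 < m) with h0 | h0
  · rw [PySem.List.pyRange_one_eq_nil h0]
    apply List.filter_eq_nil_iff.mpr
    intro x hx
    have := (PySem.List.mem_pyRange_one.mp hx).1
    simp; omega
  · have hmw : m ≤ w := by rcases hm with h | h; exact h; omega
    rw [PySem.List.pyRange_one_append 0 m w (by omega) hmw, List.filter_append]
    have h1 : (PySem.List.pyRange 0 m 1).filter (fun x => decide (x < m)) = PySem.List.pyRange 0 m 1 := by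
      apply List.filter_eq_self.mpr
      intro x hx
      have := (PySem.List.mem_pyRange_one.mp hx).2
      simp; omega
    have h2 : (PySem.List.pyRange m w 1).filter (fun x => decide (x < m)) = [] := by
      apply List.filter_eq_nil_iff.mpr
      intro x hx
      have := (PySem.List.mem_pyRange_one.mp hx).1
      simp; omega
    rw [h1, h2, List.append_nil]

-- filtering range(0, w) by y < x keeps exactly range(y+1, w), for 0 ≤ y
lemma pv_filter_gt (w y : Int) (hy : 0 ≤ y) :
    (PySem.List.pyRange 0 w 1).filter (fun x => decide (y < x)) = PySem.List.pyRange (y + 1) w 1 := by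
  rcases (by omega : w ≤ y + 1 ∨ y + 1 < w) with h | h
  · rw [PySem.List.pyRange_one_eq_nil h]
    apply List.filter_eq_nil_iff.mpr
    intro x hx
    have := (PySem.List.mem_pyRange_one.mp hx).2
    simp; omega
  · rw [PySem.List.pyRange_one_append 0 (y + 1) w (by omega) (by omega), List.filter_append]
    have h1 : (PySem.List.pyRange 0 (y + 1) 1).filter (fun x => decide (y < x)) = [] := by
      apply List.filter_eq_nil_iff.mpr
      intro x hx
      have := (PySem.List.mem_pyRange_one.mp hx).2
      simp; omega
    have h2 : (PySem.List.pyRange (y + 1) w 1).filter (fun x => decide (y < x)) = PySem.List.pyRange (y + 1) w 1 := by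
      apply List.filter_eq_self.mpr
      intro x hx
      have := (PySem.List.mem_pyRange_one.mp hx).1
      simp; omega
    rw [h1, h2, List.nil_append]

-- a flatMap whose rows are guarded by a boolean is a flatMap over the filtered list
lemma pv_flatMap_guard {α β : Type} (l : List α) (p : α → Bool) (g : α → List β) :
    l.flatMap (fun y => if p y then g y else []) = (l.filter p).flatMap g := by
  induction l with
  | nil => simp
  | cons a t ih =>
    by_cases h : p a <;> simp [List.flatMap_cons, h, ih]

-- ===== VERDICT (by name: the statement is the Claim_ definition above) =====
theorem get_source_region_cells_py_spec : Claim_equal_get_source_region_cells_py := by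
  intro w h_ axis_type _
  have hw2 : PySem.Int.floordiv w 2 ≤ w ∨ PySem.Int.floordiv w 2 ≤ 0 := by
    rw [PySem.Int.floordiv_eq_ediv_of_pos (by norm_num)]; omega
  have hh2 : PySem.Int.floordiv h_ 2 ≤ h_ ∨ PySem.Int.floordiv h_ 2 ≤ 0 := by
    rw [PySem.Int.floordiv_eq_ediv_of_pos (by norm_num)]; omega
  unfold Spec_get_source_region_cells_py get_source_region_cells_py get_source_region_cells_py_alt pvPredB
  by_cases h1 : axis_type = "vertical"
  · simp only [h1, reduceIte]
    simp only [PySem.List.foldl_append_singleton_eq_map, PySem.List.foldl_append_eq_flatMap,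
      List.nil_append]
    exact List.flatMap_congr fun y _ => by rw [pv_filter_lt w _ hw2]
  · simp only [if_neg h1]
    by_cases h2 : axis_type = "horizontal"
    · simp only [h2, reduceIte]
      simp only [PySem.List.foldl_append_singleton_eq_map, PySem.List.foldl_append_eq_flatMap,
        List.nil_append]
      rw [show (fun y => List.map (fun x => (x, y))
            (List.filter (fun x => decide (y < PySem.Int.floordiv h_ 2)) (PySem.List.pyRange 0 w 1)))
          = (fun y => if decide (y < PySem.Int.floordiv h_ 2)
              then (PySem.List.pyRange 0 w 1).map (fun x => (x, y)) else []) from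
        funext fun y => by
          by_cases hy : y < PySem.Int.floordiv h_ 2
          · rw [if_pos (decide_eq_true hy), List.filter_eq_self.mpr (fun x _ => by simpa using hy)]
          · rw [if_neg (by simpa using hy : ¬decide (y < PySem.Int.floordiv h_ 2) = true),
                List.filter_eq_nil_iff.mpr (fun x _ => by simpa using hy), List.map_nil]]
      rw [pv_flatMap_guard, pv_filter_lt h_ _ hh2]
    · simp only [if_neg h2]
      by_cases h3 : axis_type = "dual"
      · simp only [h3, reduceIte]
        simp only [PySem.List.foldl_append_singleton_eq_map, PySem.List.foldl_append_eq_flatMap,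
          List.nil_append]
        rw [show (fun y => List.map (fun x => (x, y))
              (List.filter (fun x => decide (x < PySem.Int.floordiv w 2) && decide (y < PySem.Int.floordiv h_ 2))
                (PySem.List.pyRange 0 w 1)))
            = (fun y => if decide (y < PySem.Int.floordiv h_ 2)
                then (PySem.List.pyRange 0 (PySem.Int.floordiv w 2) 1).map (fun x => (x, y)) else []) from
          funext fun y => by
            by_cases hy : y < PySem.Int.floordiv h_ 2
            · have hpred : (fun x => decide (x < PySem.Int.floordiv w 2) && decide (y < PySem.Int.floordiv h_ 2))
                  = (fun x => decide (x < PySem.Int.floordiv w 2)) := by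
                funext x; rw [decide_eq_true hy, Bool.and_true]
              rw [if_pos (decide_eq_true hy), hpred, pv_filter_lt w _ hw2]
            · rw [if_neg (by simpa using hy : ¬decide (y < PySem.Int.floordiv h_ 2) = true),
                List.filter_eq_nil_iff.mpr
                  (fun x _ => by rw [decide_eq_false hy, Bool.and_false]; simp), List.map_nil]]
        rw [pv_flatMap_guard, pv_filter_lt h_ _ hh2]
      · simp only [if_neg h3]
        by_cases h4 : axis_type = "diagonal_main"
        · simp only [h4, reduceIte]
          simp only [PySem.List.foldl_append_singleton_eq_map, PySem.List.foldl_append_eq_flatMap,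
            List.nil_append]
          exact List.flatMap_congr fun y hy => by
            rw [pv_filter_gt w y (PySem.List.mem_pyRange_one.mp hy).1]
        · simp only [if_neg h4]
          by_cases h5 : axis_type = "diagonal_anti"
          · simp only [h5, reduceIte]
            simp only [PySem.List.foldl_append_ite, PySem.List.foldl_append_eq_flatMap,
              List.nil_append]
          · simp only [if_neg h5]
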